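-- pv_equiv track=rewrite | github.com/jheelshah510/dlp_prac | dlp/python_dlp/prac9_infi2post.py | generate_quadruple
-- ===== SOURCE A (Python) =====
-- def generate_quadruple(postfix):
--     stack = []
--     quadruples = []
--     temp_count = 1
--
--     for token in postfix.split():
--         if token.isalnum():
--             stack.append(token)
--         elif token in '+-*/':
--             operand2 = stack.pop()
--             operand1 = stack.pop()
--             result = 'T' + str(temp_count)
--             temp_count += 1
--             quadruples.append((token, operand1, operand2, result))
--             stack.append(result)
--
--     return quadruples
-- ===== SOURCE B (Python) =====
-- def generate_quadruple(postfix):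
--     # Tree-based: build an expression forest in one pass, then emit quadruples
--     # by post-order traversal (post-order visit order equals postfix scan order).
--     stack = []
--     for token in postfix.split():
--         if token.isalnum():
--             stack.append(('leaf', token))
--         elif token in '+-*/':
--             right = stack.pop()
--             left = stack.pop()
--             stack.append(('node', token, left, right))
--
--     quadruples = []
--     counter = 1
--
--     def visit(node):
--         nonlocal counter
--         if node[0] == 'leaf':
--             return node[1]
--         _, op, left, right = node
--         a = visit(left)
--         b = visit(right)
--         temp = 'T' + str(counter)
--         counter += 1
--         quadruples.append((op, a, b, temp))
--         return temp
--
--     for root in stack: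
--         visit(root)
--     return quadruples
-- ===== Notes on version B (the rewrite author's own statement) =====
-- stated objective: alternative
-- what changed: B first builds an expression forest (tree nodes) in one pass over the tokens, then emits the quadruples by a recursive post-order traversal of the forest, instead of A's single pass that manipulates a stack of temporary-name strings and emits quadruples inline.
import Mathlib
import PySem

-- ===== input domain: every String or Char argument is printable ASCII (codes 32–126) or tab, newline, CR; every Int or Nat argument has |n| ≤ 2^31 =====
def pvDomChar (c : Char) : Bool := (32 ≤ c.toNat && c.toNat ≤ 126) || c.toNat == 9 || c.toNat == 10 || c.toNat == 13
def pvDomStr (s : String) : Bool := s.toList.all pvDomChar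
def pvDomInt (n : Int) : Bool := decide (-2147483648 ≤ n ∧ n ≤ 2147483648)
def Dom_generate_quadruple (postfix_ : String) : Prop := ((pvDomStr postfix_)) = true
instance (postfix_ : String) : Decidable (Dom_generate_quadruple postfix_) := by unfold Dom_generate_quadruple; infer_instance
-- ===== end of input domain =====

-- B builds an expression forest first, then emits quadruples by post-order traversal
-- (post-order visit order equals postfix scan order); same return value as A.

-- ===== PORT A =====
-- A's loop state: (stack, quadruples, temp_count); stack top at the head.
def gqStepA (st : List String × List (String × String × String × String) × Int)
    (token : String) : List String × List (String × String × String × String) × Int :=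
  if PySem.Str.strIsalnum token then (token :: st.1, st.2.1, st.2.2)
  else if PySem.Str.isIn token "+-*/" then
    match st.1 with
    | operand2 :: operand1 :: rest =>
        let result := "T" ++ PySem.Int.toStr st.2.2
        (result :: rest, st.2.1 ++ [(token, operand1, operand2, result)], st.2.2 + 1)
    | _ => st   -- stack.pop() on a short stack raises IndexError in Python; excluded by Pre_
  else st

def generate_quadruple (postfix_ : String) : List (String × String × String × String) :=
  ((PySem.Str.split₀ postfix_).foldl gqStepA ([], [], 1)).2.1

-- ===== PORT B =====
inductive GQTree : Type
  | leaf : String → GQTree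
  | node : String → GQTree → GQTree → GQTree
deriving DecidableEq, Repr

-- one pass: build the expression forest (stack top at the head)
def gqBuildStep (stack : List GQTree) (token : String) : List GQTree :=
  if PySem.Str.strIsalnum token then GQTree.leaf token :: stack
  else if PySem.Str.isIn token "+-*/" then
    match stack with
    | right :: left :: rest => GQTree.node token left right :: rest
    | _ => stack   -- stack.pop() on a short stack raises IndexError in Python; excluded by Pre_
  else stack

-- visit(node): post-order traversal; returns (result string, quadruples, counter)
def gqVisit : GQTree → Int → List (String × String × String × String) →
    String × List (String × String × String × String) × Int
  | GQTree.leaf s, c, q => (s, q, c)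
  | GQTree.node op l r, c, q =>
      let va := gqVisit l c q
      let vb := gqVisit r va.2.2 va.2.1
      let temp := "T" ++ PySem.Int.toStr vb.2.2
      (temp, vb.2.1 ++ [(op, va.1, vb.1, temp)], vb.2.2 + 1)

def generate_quadruple_alt (postfix_ : String) : List (String × String × String × String) :=
  (((PySem.Str.split₀ postfix_).foldl gqBuildStep []).reverse.foldl
    (fun (s : List (String × String × String × String) × Int) root =>
      let v := gqVisit root s.2 s.1
      (v.2.1, v.2.2)) ([], 1)).1

-- ===== PRECONDITION & SPEC =====
-- an operator token as A classifies it (not alnum, and a substring of '+-*/')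
def pvGQOp (t : String) : Bool := !(PySem.Str.strIsalnum t) && PySem.Str.isIn t "+-*/"

-- Pre_ excludes exactly the inputs on which A raises IndexError: some operator token is
-- reached with fewer than two operands on the stack (B raises there too).
def Pre_generate_quadruple (postfix_ : String) : Prop :=
  ∀ i, i < (PySem.Str.split₀ postfix_).length →
    ((PySem.Str.split₀ postfix_)[i]?.any pvGQOp = true) →
    ((PySem.Str.split₀ postfix_).take i).countP pvGQOp + 2 ≤
      ((PySem.Str.split₀ postfix_).take i).countP (fun t => PySem.Str.strIsalnum t)

instance (postfix_ : String) : Decidable (Pre_generate_quadruple postfix_) := by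
  unfold Pre_generate_quadruple; infer_instance

def pvWitness_generate_quadruple : String := "a b + c *"

def Spec_generate_quadruple (postfix_ : String) (out : List (String × String × String × String)) : Prop := out = generate_quadruple_alt postfix_
instance (postfix_ : String) (out : List (String × String × String × String)) : Decidable (Spec_generate_quadruple postfix_ out) := by unfold Spec_generate_quadruple; infer_instance

-- ===== CLAIM (what is proved, stated in full; the proofs are below) =====
def Claim_equal_generate_quadruple : Prop := ∀ (postfix_ : String), Dom_generate_quadruple postfix_ → Pre_generate_quadruple postfix_ → Spec_generate_quadruple postfix_ (generate_quadruple postfix_)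

-- ===== LEMMAS AND PROOFS =====

-- sequential traversal of a forest: (results in order, quadruples, counter)
def gqVisitAll : List GQTree → Int → List (String × String × String × String) →
    List String × List (String × String × String × String) × Int
  | [], c, q => ([], q, c)
  | t :: ts, c, q =>
      let v := gqVisit t c q
      let p := gqVisitAll ts v.2.2 v.2.1
      (v.1 :: p.1, p.2.1, p.2.2)

theorem gqVisitAll_append (xs ys : List GQTree) (c : Int)
    (q : List (String × String × String × String)) :
    gqVisitAll (xs ++ ys) c q =
      ((gqVisitAll xs c q).1 ++ (gqVisitAll ys (gqVisitAll xs c q).2.2 (gqVisitAll xs c q).2.1).1,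
       (gqVisitAll ys (gqVisitAll xs c q).2.2 (gqVisitAll xs c q).2.1).2.1,
       (gqVisitAll ys (gqVisitAll xs c q).2.2 (gqVisitAll xs c q).2.1).2.2) := by
  induction xs generalizing c q with
  | nil => simp [gqVisitAll]
  | cons t ts ih => simp [gqVisitAll, ih]

theorem gqVisitAll_snoc (xs : List GQTree) (t : GQTree) (c : Int)
    (q : List (String × String × String × String)) :
    gqVisitAll (xs ++ [t]) c q =
      ((gqVisitAll xs c q).1 ++ [(gqVisit t (gqVisitAll xs c q).2.2 (gqVisitAll xs c q).2.1).1],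
       (gqVisit t (gqVisitAll xs c q).2.2 (gqVisitAll xs c q).2.1).2.1,
       (gqVisit t (gqVisitAll xs c q).2.2 (gqVisitAll xs c q).2.1).2.2) := by
  rw [gqVisitAll_append]; simp [gqVisitAll]

theorem gqVisitAll_length (xs : List GQTree) (c : Int)
    (q : List (String × String × String × String)) :
    (gqVisitAll xs c q).1.length = xs.length := by
  induction xs generalizing c q with
  | nil => simp [gqVisitAll]
  | cons t ts ih => simp [gqVisitAll, ih]

-- the main invariant: if the B build-stack "bs" evaluates (via traversal from scratch)
-- to A's state (as, q, c), then the same holds after processing any further token list.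
theorem gq_main (ts : List String) (as : List String)
    (q : List (String × String × String × String)) (c : Int) (bs : List GQTree)
    (h : gqVisitAll bs.reverse 1 [] = (as.reverse, q, c)) :
    gqVisitAll ((ts.foldl gqBuildStep bs).reverse) 1 [] =
      ((ts.foldl gqStepA (as, q, c)).1.reverse,
       (ts.foldl gqStepA (as, q, c)).2.1,
       (ts.foldl gqStepA (as, q, c)).2.2) := by
  induction ts generalizing as q c bs with
  | nil => simpa using h
  | cons t ts ih =>
    simp only [List.foldl_cons]
    have hlen : bs.length = as.length := by
      have h2 := gqVisitAll_length bs.reverse 1 []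
      rw [h] at h2; simpa using h2.symm
    by_cases halnum : PySem.Chars.strIsalnum t.toList = true
    · have hA : gqStepA (as, q, c) t = (t :: as, q, c) := by simp [gqStepA, halnum]
      have hB : gqBuildStep bs t = GQTree.leaf t :: bs := by simp [gqBuildStep, halnum]
      rw [hA, hB]
      apply ih
      rw [List.reverse_cons, gqVisitAll_snoc, h]
      simp [gqVisit]
    · by_cases hop : PySem.Chars.isIn t.toList ['+', '-', '*', '/'] = true
      · match bs, as, hlen with
        | [], [], _ =>
          have hA : gqStepA (([] : List String), q, c) t = ([], q, c) := by
            simp [gqStepA, halnum]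
          have hB : gqBuildStep ([] : List GQTree) t = [] := by
            simp [gqBuildStep, halnum]
          rw [hA, hB]; exact ih [] q c [] h
        | [t1], [a1], _ =>
          have hA : gqStepA ([a1], q, c) t = ([a1], q, c) := by
            simp [gqStepA, halnum]
          have hB : gqBuildStep [t1] t = [t1] := by
            simp [gqBuildStep, halnum]
          rw [hA, hB]; exact ih [a1] q c [t1] h
        | t2 :: t1 :: restB, a2 :: a1 :: restA, hlen =>
          have hlen' : restB.length = restA.length := by simpa using hlen
          -- decompose the invariant
          rw [show (t2 :: t1 :: restB).reverse = (restB.reverse ++ [t1]) ++ [t2] by simp,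
              gqVisitAll_snoc, gqVisitAll_snoc] at h
          have hq := congrArg (fun p => p.2.1) h
          have hc := congrArg (fun p => p.2.2) h
          have hl := congrArg (fun p => p.1) h
          simp only at hq hc hl
          rw [show (a2 :: a1 :: restA).reverse = (restA.reverse ++ [a1]) ++ [a2] by simp] at hl
          have hlen1 : ((gqVisitAll restB.reverse 1 []).1 ++
              [(gqVisit t1 (gqVisitAll restB.reverse 1 []).2.2
                  (gqVisitAll restB.reverse 1 []).2.1).1]).length =
              (restA.reverse ++ [a1]).length := by
            simp [gqVisitAll_length, hlen']
          obtain ⟨hl1, hl2⟩ := List.append_inj hl (by simpa using hlen1)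
          have hl2' : (gqVisit t2
              (gqVisit t1 (gqVisitAll restB.reverse 1 []).2.2
                (gqVisitAll restB.reverse 1 []).2.1).2.2
              (gqVisit t1 (gqVisitAll restB.reverse 1 []).2.2
                (gqVisitAll restB.reverse 1 []).2.1).2.1).1 = a2 := by
            simpa using hl2
          have hlen2 : (gqVisitAll restB.reverse 1 []).1.length =
              restA.reverse.length := by simp [gqVisitAll_length, hlen']
          obtain ⟨hl3, hl4⟩ := List.append_inj hl1 hlen2
          have hl4' : (gqVisit t1 (gqVisitAll restB.reverse 1 []).2.2
              (gqVisitAll restB.reverse 1 []).2.1).1 = a1 := by simpa using hl4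
          -- step both sides
          have hA : gqStepA (a2 :: a1 :: restA, q, c) t =
              (("T" ++ PySem.Int.toStr c) :: restA,
               q ++ [(t, a1, a2, "T" ++ PySem.Int.toStr c)], c + 1) := by
            simp [gqStepA, halnum, hop]
          have hB : gqBuildStep (t2 :: t1 :: restB) t =
              GQTree.node t t1 t2 :: restB := by
            simp [gqBuildStep, halnum, hop]
          rw [hA, hB]
          apply ih
          rw [List.reverse_cons, gqVisitAll_snoc]
          simp only [gqVisit, List.reverse_cons]
          rw [hl3, hl4', hl2', hq, hc]
      · have hA : gqStepA (as, q, c) t = (as, q, c) := by simp [gqStepA, halnum, hop]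
        have hB : gqBuildStep bs t = bs := by simp [gqBuildStep, halnum, hop]
        rw [hA, hB]; exact ih as q c bs h

-- B's foldl over the roots computes the (quadruples, counter) of gqVisitAll
theorem gq_fold_eq_visitAll (xs : List GQTree)
    (q : List (String × String × String × String)) (c : Int) :
    xs.foldl
      (fun (s : List (String × String × String × String) × Int) root =>
        let v := gqVisit root s.2 s.1
        (v.2.1, v.2.2)) (q, c) =
      ((gqVisitAll xs c q).2.1, (gqVisitAll xs c q).2.2) := by
  induction xs generalizing q c with
  | nil => simp [gqVisitAll]
  | cons t ts ih => simp [gqVisitAll, ih]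

-- ===== VERDICT (by name: the statement is the Claim_ definition above) =====
theorem generate_quadruple_spec : Claim_equal_generate_quadruple := by
  intro postfix_ _ _
  unfold Spec_generate_quadruple generate_quadruple generate_quadruple_alt
  rw [gq_fold_eq_visitAll]
  have := gq_main (PySem.Str.split₀ postfix_) [] [] 1 [] (by simp [gqVisitAll])
  rw [this]
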